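-- pv_equiv track=rewrite | github.com/tius1234/algorithm | baekjoon/python/success/9095.py | sum_one_two_three
-- ===== SOURCE A (Python) =====
-- def sum_one_two_three(num, result_dic={}):
--
--     if num < 0:
--         return 0
--     elif num == 0:
--         return 1
--
--     if result_dic.get(num):
--         return result_dic[num]
--
--     if num >= 3:
--         result_dic[num] = sum([
--             sum_one_two_three(num-1),
--             sum_one_two_three(num-2),
--             sum_one_two_three(num-3)
--         ])
--     elif num == 2:
--         result_dic[num] = sum([
--             sum_one_two_three(num-1),
--             sum_one_two_three(num-2)
--         ])
--     else:
--         result_dic[num] = sum_one_two_three(num-1)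
--
--     return result_dic[num]
-- ===== SOURCE B (Python) =====
-- def sum_one_two_three(num, result_dic={}):
--     if num < 0:
--         return 0
--     if num == 0:
--         return 1
--     v = result_dic.get(num)
--     if v:
--         return v
--     a, b, c = 0, 0, 1  # counts for positions i-3, i-2, i-1 (starting before i = 1)
--     for _ in range(num):
--         a, b, c = b, c, a + b + c
--     result_dic[num] = c
--     return c
-- ===== Notes on version B (the rewrite author's own statement) =====
-- stated objective: simpler
-- what changed: Replaced the memoized branching recursion by a single bottom-up forward pass keeping only the last three counts (rolling variables); no recursion, no memo dict.
import Mathlib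
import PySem

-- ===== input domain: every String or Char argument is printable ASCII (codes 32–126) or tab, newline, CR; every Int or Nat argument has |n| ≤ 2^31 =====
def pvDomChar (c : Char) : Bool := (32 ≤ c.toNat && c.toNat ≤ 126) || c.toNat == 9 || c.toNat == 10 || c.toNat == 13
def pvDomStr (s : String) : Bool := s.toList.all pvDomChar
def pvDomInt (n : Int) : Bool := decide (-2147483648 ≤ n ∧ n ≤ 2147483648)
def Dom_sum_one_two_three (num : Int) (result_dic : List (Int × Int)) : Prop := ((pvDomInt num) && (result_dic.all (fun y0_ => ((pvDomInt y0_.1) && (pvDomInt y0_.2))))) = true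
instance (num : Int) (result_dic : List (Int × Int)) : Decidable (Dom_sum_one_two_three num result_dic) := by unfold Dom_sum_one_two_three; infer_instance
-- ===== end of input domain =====

-- B replaces A's memoized recursion by a bottom-up pass over three rolling counts; equivalence is about return values only (A also writes the computed count into result_dic, B mirrors that write in Python).


-- ===== PORT A =====
-- 'result_dic[num] = v' on an association list: overwrite the first matching key, else append.
def pySetItem (d : List (Int × Int)) (k v : Int) : List (Int × Int) :=
  match d with
  | [] => [(k, v)]
  | (k', v') :: rest => if k' = k then (k, v) :: rest else (k', v') :: pySetItem rest k v

-- A's recursive calls all share Python's mutable default dict; sumMemo transliterates that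
-- recursion with the shared dict threaded as explicit state (same lookups, same writes,
-- same left-to-right evaluation order of sum([...])).
def sumMemo (num : Int) (d : List (Int × Int)) : List (Int × Int) × Int :=
  if _h1 : num < 0 then (d, 0)
  else if _h2 : num = 0 then (d, 1)
  else if (List.lookup num d).getD 0 ≠ 0 then (d, (List.lookup num d).getD 0)
  else if _h4 : num ≥ 3 then
    let r1 := sumMemo (num - 1) d
    let r2 := sumMemo (num - 2) r1.1
    let r3 := sumMemo (num - 3) r2.1
    let s := r1.2 + r2.2 + r3.2
    (pySetItem r3.1 num s, s)
  else if num = 2 then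
    let r1 := sumMemo (num - 1) d
    let r2 := sumMemo (num - 2) r1.1
    let s := r1.2 + r2.2
    (pySetItem r2.1 num s, s)
  else
    let r1 := sumMemo (num - 1) d
    (pySetItem r1.1 num r1.2, r1.2)
termination_by num.toNat
decreasing_by all_goals omega

-- Top level: the explicit result_dic is only read (get) and written at num; the recursive
-- calls use the (value-wise fresh) default dict. Return value only; A's write to result_dic
-- is a side effect not modelled here.
def sum_one_two_three (num : Int) (result_dic : List (Int × Int)) : Int :=
  if num < 0 then 0
  else if num = 0 then 1
  else if (List.lookup num result_dic).getD 0 ≠ 0 then (List.lookup num result_dic).getD 0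
  else if num ≥ 3 then
    let r1 := sumMemo (num - 1) []
    let r2 := sumMemo (num - 2) r1.1
    let r3 := sumMemo (num - 3) r2.1
    r1.2 + r2.2 + r3.2
  else if num = 2 then
    let r1 := sumMemo (num - 1) []
    let r2 := sumMemo (num - 2) r1.1
    r1.2 + r2.2
  else (sumMemo (num - 1) []).2

-- ===== PORT B =====
-- rolling three counts: a,b,c are the counts for positions i-3, i-2, i-1
def tribUp (a b c : Int) : Nat → Int
  | 0 => c
  | n + 1 => tribUp b c (a + b + c) n

def sum_one_two_three_alt (num : Int) (result_dic : List (Int × Int)) : Int :=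
  if num < 0 then 0
  else if num = 0 then 1
  else if (List.lookup num result_dic).getD 0 ≠ 0 then (List.lookup num result_dic).getD 0
  else tribUp 0 0 1 num.toNat

-- ===== PRECONDITION & SPEC =====
-- Pre_ excludes large num without a truthy memo entry, where Python A exceeds the interpreter's
-- recursion limit and raises RecursionError (fresh interpreter: raises from num = 1000; the
-- bound 900 leaves safety margin for caller stack depth, so some returning inputs near the limit are excluded too).
def Pre_sum_one_two_three (num : Int) (result_dic : List (Int × Int)) : Prop :=
  num < 900 ∨ (List.lookup num result_dic).getD 0 ≠ 0
instance (num : Int) (result_dic : List (Int × Int)) : Decidable (Pre_sum_one_two_three num result_dic) := by unfold Pre_sum_one_two_three; infer_instance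
def pvWitness_sum_one_two_three : Int × (List (Int × Int)) := (7, [(2, 7)])

def Spec_sum_one_two_three (num : Int) (result_dic : List (Int × Int)) (out : Int) : Prop := out = sum_one_two_three_alt num result_dic
instance (num : Int) (result_dic : List (Int × Int)) (out : Int) : Decidable (Spec_sum_one_two_three num result_dic out) := by unfold Spec_sum_one_two_three; infer_instance

-- ===== CLAIM (what is proved, stated in full; the proofs are below) =====
def Claim_equal_sum_one_two_three : Prop := ∀ (num : Int) (result_dic : List (Int × Int)), Dom_sum_one_two_three num result_dic → Pre_sum_one_two_three num result_dic → Spec_sum_one_two_three num result_dic (sum_one_two_three num result_dic)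

-- ===== LEMMAS AND PROOFS =====

-- the intended value: 0 for negative positions, else the bottom-up count
def trib (k : Int) : Int := if k < 0 then 0 else tribUp 0 0 1 k.toNat

-- memo invariant: every entry stores the correct count for its key
def GoodMemo (d : List (Int × Int)) : Prop := ∀ p ∈ d, p.2 = trib p.1

theorem tribUp_rec (n : Nat) : ∀ a b c : Int,
    tribUp a b c (n + 3) = tribUp a b c (n + 2) + tribUp a b c (n + 1) + tribUp a b c n := by
  induction n with
  | zero => intro a b c; simp [tribUp]; ring
  | succ n ih =>
      intro a b c
      show tribUp b c (a + b + c) (n + 3)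
        = tribUp b c (a + b + c) (n + 2) + tribUp b c (a + b + c) (n + 1) + tribUp b c (a + b + c) n
      exact ih b c (a + b + c)

theorem trib_rec (k : Int) (hk : 3 ≤ k) : trib k = trib (k - 1) + trib (k - 2) + trib (k - 3) := by
  obtain ⟨m, rfl⟩ : ∃ m : Nat, k = (m : Int) + 3 := ⟨(k - 3).toNat, by omega⟩
  unfold trib
  rw [if_neg (by omega), if_neg (by omega), if_neg (by omega), if_neg (by omega)]
  have e0 : ((m : Int) + 3).toNat = m + 3 := by omega
  have e1 : ((m : Int) + 3 - 1).toNat = m + 2 := by omega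
  have e2 : ((m : Int) + 3 - 2).toNat = m + 1 := by omega
  have e3 : ((m : Int) + 3 - 3).toNat = m := by omega
  rw [e0, e1, e2, e3]
  exact tribUp_rec m 0 0 1

theorem lookup_mem {d : List (Int × Int)} {k v : Int} (h : List.lookup k d = some v) : (k, v) ∈ d := by
  induction d with
  | nil => simp [List.lookup] at h
  | cons p rest ih =>
      obtain ⟨k', v'⟩ := p
      by_cases hk : k = k'
      · subst hk
        simp [List.lookup] at h
        simp [h]
      · simp only [List.lookup, beq_eq_false_iff_ne.mpr hk] at h
        exact List.mem_cons_of_mem _ (ih h)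

theorem good_setItem {d : List (Int × Int)} {k v : Int} (hd : GoodMemo d) (hv : v = trib k) :
    GoodMemo (pySetItem d k v) := by
  induction d with
  | nil => intro p hp; simp [pySetItem] at hp; simp [hp, hv]
  | cons q rest ih =>
      obtain ⟨k', v'⟩ := q
      intro p hp
      by_cases hk : k' = k
      · rw [pySetItem, if_pos hk] at hp
        rcases List.mem_cons.mp hp with h | h
        · simp [h, hv]
        · exact hd p (List.mem_cons_of_mem _ h)
      · rw [pySetItem, if_neg hk] at hp
        rcases List.mem_cons.mp hp with h | h
        · exact hd p (by simp [h])
        · exact ih (fun q hq => hd q (List.mem_cons_of_mem _ hq)) p h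

theorem sumMemo_spec : ∀ (N : Nat) (num : Int), num.toNat ≤ N → ∀ d : List (Int × Int), GoodMemo d →
    (sumMemo num d).2 = trib num ∧ GoodMemo (sumMemo num d).1 := by
  intro N
  induction N with
  | zero =>
      intro num hN d hd
      rw [sumMemo]
      by_cases h1 : num < 0
      · rw [dif_pos h1]; exact ⟨by simp [trib, h1], hd⟩
      · have h2 : num = 0 := by omega
        rw [dif_neg h1, dif_pos h2]
        exact ⟨by simp [trib, h2, tribUp], hd⟩
  | succ N ih =>
      intro num hN d hd
      rw [sumMemo]
      by_cases h1 : num < 0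
      · rw [dif_pos h1]; exact ⟨by simp [trib, h1], hd⟩
      rw [dif_neg h1]
      by_cases h2 : num = 0
      · rw [dif_pos h2]; exact ⟨by simp [trib, h2, tribUp], hd⟩
      rw [dif_neg h2]
      by_cases hm : (List.lookup num d).getD 0 ≠ 0
      · rw [if_pos hm]
        refine ⟨?_, hd⟩
        cases hl : List.lookup num d with
        | none => rw [hl] at hm; simp at hm
        | some v =>
            simp only [Option.getD_some]
            simpa using hd _ (lookup_mem hl)
      rw [if_neg hm]
      have hb1 : (num - 1).toNat ≤ N := by omega
      by_cases h4 : num ≥ 3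
      · rw [dif_pos h4]
        obtain ⟨e1, g1⟩ := ih (num - 1) hb1 d hd
        obtain ⟨e2, g2⟩ := ih (num - 2) (by omega) _ g1
        obtain ⟨e3, g3⟩ := ih (num - 3) (by omega) _ g2
        have hs : (sumMemo (num - 1) d).2 + (sumMemo (num - 2) (sumMemo (num - 1) d).1).2 +
            (sumMemo (num - 3) (sumMemo (num - 2) (sumMemo (num - 1) d).1).1).2 = trib num := by
          rw [e1, e2, e3]; exact (trib_rec num h4).symm
        exact ⟨hs, good_setItem g3 hs⟩
      rw [dif_neg h4]
      by_cases h5 : num = 2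
      · rw [if_pos h5]
        obtain ⟨e1, g1⟩ := ih (num - 1) hb1 d hd
        obtain ⟨e2, g2⟩ := ih (num - 2) (by omega) _ g1
        have hs : (sumMemo (num - 1) d).2 + (sumMemo (num - 2) (sumMemo (num - 1) d).1).2 = trib num := by
          rw [e1, e2, h5]; decide
        exact ⟨hs, good_setItem g2 hs⟩
      · rw [if_neg h5]
        have hnum : num = 1 := by omega
        obtain ⟨e1, g1⟩ := ih (num - 1) hb1 d hd
        have hs : (sumMemo (num - 1) d).2 = trib num := by rw [e1, hnum]; decide
        exact ⟨hs, good_setItem g1 hs⟩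

theorem goodMemo_nil : GoodMemo [] := by intro p hp; simp at hp

theorem sum_one_two_three_spec : Claim_equal_sum_one_two_three := by
  intro num d _hdom _hpre
  unfold Spec_sum_one_two_three sum_one_two_three_alt sum_one_two_three
  by_cases h1 : num < 0
  · rw [if_pos h1, if_pos h1]
  rw [if_neg h1, if_neg h1]
  by_cases h2 : num = 0
  · rw [if_pos h2, if_pos h2]
  rw [if_neg h2, if_neg h2]
  by_cases hm : (List.lookup num d).getD 0 ≠ 0
  · rw [if_pos hm, if_pos hm]
  rw [if_neg hm, if_neg hm]
  have htrib : trib num = tribUp 0 0 1 num.toNat := by rw [trib, if_neg h1]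
  by_cases h4 : num ≥ 3
  · rw [if_pos h4]
    obtain ⟨e1, g1⟩ := sumMemo_spec (num - 1).toNat (num - 1) le_rfl [] goodMemo_nil
    obtain ⟨e2, g2⟩ := sumMemo_spec (num - 2).toNat (num - 2) le_rfl _ g1
    obtain ⟨e3, _⟩ := sumMemo_spec (num - 3).toNat (num - 3) le_rfl _ g2
    rw [← htrib]
    show (sumMemo (num - 1) []).2 + (sumMemo (num - 2) (sumMemo (num - 1) []).1).2 +
        (sumMemo (num - 3) (sumMemo (num - 2) (sumMemo (num - 1) []).1).1).2 = trib num
    rw [e1, e2, e3]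
    exact (trib_rec num h4).symm
  rw [if_neg h4]
  by_cases h5 : num = 2
  · rw [if_pos h5]
    obtain ⟨e1, g1⟩ := sumMemo_spec (num - 1).toNat (num - 1) le_rfl [] goodMemo_nil
    obtain ⟨e2, _⟩ := sumMemo_spec (num - 2).toNat (num - 2) le_rfl _ g1
    rw [← htrib]
    show (sumMemo (num - 1) []).2 + (sumMemo (num - 2) (sumMemo (num - 1) []).1).2 = trib num
    rw [e1, e2, h5]
    decide
  · rw [if_neg h5]
    have hnum : num = 1 := by omega
    obtain ⟨e1, _⟩ := sumMemo_spec (num - 1).toNat (num - 1) le_rfl [] goodMemo_nil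
    rw [← htrib, e1, hnum]
    decide
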